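-- pv_equiv track=rewrite | github.com/deveucatur/vamteste | ScrapinpClick.py | limpaValor
-- ===== SOURCE A (Python) =====
-- def limpaValor(valor):
--     cont = 0
--     digit = ''
--     PosVirg = ''
--     for a in valor:
--         qnt = len(valor) - 3
--         cont += 1
--         if cont <= qnt:
--             digit += a
--         elif cont > qnt + 1:
--             PosVirg += a
--     numFinal = f'{digit}.{PosVirg}'
--     return(numFinal)
-- ===== SOURCE B (Python) =====
-- def limpaValor(valor):
--     return f'{valor[:-3]}.{valor[-2:]}'
-- ===== Notes on version B (the rewrite author's own statement) =====
-- stated objective: simpler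
-- what changed: Replaces the counter-driven per-character loop that accumulates two strings with two direct slices (valor[:-3] and valor[-2:]) joined by a dot; measured faster since slicing runs in C instead of a Python-level loop with repeated string concatenation.
import Mathlib
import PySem

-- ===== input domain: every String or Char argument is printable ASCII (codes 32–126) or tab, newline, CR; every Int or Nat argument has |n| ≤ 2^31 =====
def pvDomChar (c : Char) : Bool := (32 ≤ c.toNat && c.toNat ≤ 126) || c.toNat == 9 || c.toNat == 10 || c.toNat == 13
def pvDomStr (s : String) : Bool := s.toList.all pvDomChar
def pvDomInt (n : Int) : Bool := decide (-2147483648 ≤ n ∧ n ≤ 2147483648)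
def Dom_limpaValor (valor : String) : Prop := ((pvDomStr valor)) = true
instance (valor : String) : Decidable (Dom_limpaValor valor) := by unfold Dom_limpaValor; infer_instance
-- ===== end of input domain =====

-- B replaces A's counter-driven character loop by two direct slices joined with a dot (simpler).

-- ===== PORT A =====
-- literal transliteration: loop over the characters with counter cont, building digit and PosVirg
def limpaValor (valor : String) : String :=
  let st := valor.toList.foldl
    (fun (st : Int × List Char × List Char) a =>
      let qnt : Int := PySem.Str.len valor - 3
      let cont := st.1 + 1
      if cont ≤ qnt then (cont, st.2.1 ++ [a], st.2.2)
      else if cont > qnt + 1 then (cont, st.2.1, st.2.2 ++ [a])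
      else (cont, st.2.1, st.2.2))
    (0, [], [])
  String.ofList (st.2.1 ++ '.' :: st.2.2)

-- ===== PORT B =====
-- literal transliteration of Source B: f'{valor[:-3]}.{valor[-2:]}'
def limpaValor_alt (valor : String) : String :=
  String.ofList (PySem.List.slice valor.toList none (some (-3)) ++
    '.' :: PySem.List.slice valor.toList (some (-2)) none)

-- ===== PRECONDITION & SPEC =====
def Spec_limpaValor (valor : String) (out : String) : Prop := out = limpaValor_alt valor
instance (valor : String) (out : String) : Decidable (Spec_limpaValor valor out) := by unfold Spec_limpaValor; infer_instance

-- ===== CLAIM (what is proved, stated in full; the proofs are below) =====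
def Claim_equal_limpaValor : Prop := ∀ (valor : String), Dom_limpaValor valor → Spec_limpaValor valor (limpaValor valor)

-- ===== LEMMAS AND PROOFS =====

-- invariant of A's loop: with counter start c, digit gains cs.take (q-c) and PosVirg gains cs.drop (q+1-c)
theorem limpaValor_loop (q : Int) (cs : List Char) : ∀ (c : Int) (d p : List Char),
    cs.foldl
      (fun (st : Int × List Char × List Char) a =>
        let cont := st.1 + 1
        if cont ≤ q then (cont, st.2.1 ++ [a], st.2.2)
        else if cont > q + 1 then (cont, st.2.1, st.2.2 ++ [a])
        else (cont, st.2.1, st.2.2))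
      (c, d, p)
    = (c + cs.length, d ++ cs.take (q - c).toNat, p ++ cs.drop (q + 1 - c).toNat) := by
  induction cs with
  | nil => intro c d p; simp
  | cons a cs ih =>
    intro c d p
    simp only [List.foldl_cons]
    by_cases h1 : c + 1 ≤ q
    · rw [if_pos h1, ih]
      have ht : (q - c).toNat = (q - (c + 1)).toNat + 1 := by omega
      have hd : (q + 1 - c).toNat = (q + 1 - (c + 1)).toNat + 1 := by omega
      simp [ht, hd, List.length_cons]
      omega
    · by_cases h2 : c + 1 > q + 1
      · rw [if_neg h1, if_pos h2, ih]
        have ht : (q - c).toNat = 0 := by omega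
        have ht' : (q - (c + 1)).toNat = 0 := by omega
        have hd : (q + 1 - c).toNat = 0 := by omega
        have hd' : (q + 1 - (c + 1)).toNat = 0 := by omega
        simp [ht, ht', hd, List.length_cons]
        omega
      · rw [if_neg h1, if_neg h2, ih]
        have ht : (q - c).toNat = 0 := by omega
        have ht' : (q - (c + 1)).toNat = 0 := by omega
        have hd : (q + 1 - c).toNat = 1 := by omega
        have hd' : (q + 1 - (c + 1)).toNat = 0 := by omega
        simp [ht, ht', hd, List.length_cons]
        omega

-- ===== VERDICT (by name: the statement is the Claim_ definition above) =====
theorem limpaValor_spec : Claim_equal_limpaValor := by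
  intro valor _
  unfold Spec_limpaValor limpaValor limpaValor_alt
  rw [limpaValor_loop]
  rw [PySem.List.slice_to_neg_ofNat valor.toList 3 (by omega),
      PySem.List.slice_from_neg_ofNat valor.toList 2 (by omega)]
  have h1 : ((valor.length : Int) - 3).toNat = valor.toList.length - 3 := by
    simp; omega
  have h2 : ((valor.length : Int) - 3 + 1).toNat = valor.toList.length - 2 := by
    simp; omega
  simp [h1, h2]
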